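-- pv_equiv track=rewrite | github.com/jdonszelmann/aoc2023 | src/day14/main.py | calc
-- ===== SOURCE A (Python) =====
-- def calc(inp):
--     total_load = 0
--     for row in range(len(inp), 0, -1):
--         y = len(inp) - row
--         for x in range(0, len(inp[0])):
--             if inp[y][x] == "O":
--                 total_load += row
--
--     return total_load
-- ===== SOURCE B (Python) =====
-- def calc(inp):
--     w = len(inp[0]) if inp else 0
--     total = running = 0
--     for row in inp:
--         running += sum(1 for x in range(w) if row[x] == "O")
--         total += running
--     return total
-- ===== Notes on version B (the rewrite author's own statement) =====
-- stated objective: alternative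
-- what changed: Replaces the countdown over explicit row weights (adding the weight once per 'O' cell) by a single top-down pass keeping a running count of 'O's seen so far and adding that running count to the total at each row, so the weights arise from repeated addition instead of per-cell weight increments.
import Mathlib
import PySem

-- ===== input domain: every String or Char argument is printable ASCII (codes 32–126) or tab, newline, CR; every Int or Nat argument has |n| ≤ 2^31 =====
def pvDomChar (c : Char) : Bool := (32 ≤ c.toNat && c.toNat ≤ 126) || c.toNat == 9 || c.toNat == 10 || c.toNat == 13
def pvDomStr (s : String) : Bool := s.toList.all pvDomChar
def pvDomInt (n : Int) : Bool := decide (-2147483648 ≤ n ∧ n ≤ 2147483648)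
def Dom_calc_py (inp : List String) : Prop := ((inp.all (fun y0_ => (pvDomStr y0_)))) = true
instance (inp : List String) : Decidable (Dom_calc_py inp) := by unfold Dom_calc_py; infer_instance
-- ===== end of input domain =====

-- B replaces A's countdown over explicit row weights by one top-down pass with a running 'O' count added to the total at each row; objective: alternative.

-- ===== PORT A =====
def calc_py (inp : List String) : Int :=
  (PySem.List.pyRange (inp.length : Int) 0 (-1)).foldl (fun total row =>
    let y : Int := (inp.length : Int) - row
    (PySem.List.pyRange 0 ((PySem.List.pyGetD inp 0 "").toList.length : Int) 1).foldl
      (fun t x =>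
        if PySem.List.pyGet? (PySem.List.pyGetD inp y "").toList x = some 'O' then t + row else t)
      total) 0

-- ===== PORT B =====
-- 'sum(1 for x in range(w) if row[x] == "O")' is ported as the sum of the mapped 0/1 terms.
def calc_py_alt (inp : List String) : Int :=
  let w : Nat := match inp with | [] => 0 | h :: _ => h.toList.length
  (inp.foldl (fun (acc : Int × Int) row =>
      let cnt : Int := ((PySem.List.pyRange 0 (w : Int) 1).map
          (fun x => if PySem.List.pyGet? row.toList x = some 'O' then (1:Int) else 0)).sum
      (acc.1 + (acc.2 + cnt), acc.2 + cnt)) (0, 0)).1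

-- ===== PRECONDITION & SPEC =====
-- Pre_ excludes exactly the ragged grids with a row shorter than the first row, on which both A's and B's row[x] raise IndexError.
def Pre_calc_py (inp : List String) : Prop :=
  ∀ s ∈ inp, (inp.headD "").toList.length ≤ s.toList.length
instance (inp : List String) : Decidable (Pre_calc_py inp) := by unfold Pre_calc_py; infer_instance
def pvWitness_calc_py : List String := ["O.", ".O", ".."]

def Spec_calc_py (inp : List String) (out : Int) : Prop := out = calc_py_alt inp
instance (inp : List String) (out : Int) : Decidable (Spec_calc_py inp out) := by unfold Spec_calc_py; infer_instance

-- ===== CLAIM (what is proved, stated in full; the proofs are below) =====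
def Claim_equal_calc_py : Prop := ∀ (inp : List String), Dom_calc_py inp → Pre_calc_py inp → Spec_calc_py inp (calc_py inp)

-- ===== LEMMAS AND PROOFS =====

-- inner loop of A: scanning columns 0..w-1 of s (w ≤ len s) adds row * (number of 'O' among the first w chars)
lemma inner_loop_eq (s : List Char) (w : Nat) (row total : Int) (hw : w ≤ s.length) :
    (PySem.List.pyRange 0 (w : Int) 1).foldl
      (fun t x => if PySem.List.pyGet? s x = some 'O' then t + row else t) total
    = total + row * ((s.take w).count 'O' : Int) := by
  have hlen : (s.take w).length = w := by simp [hw]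
  have hcast : (w : Int) = PySem.List.len (s.take w) := by simp [PySem.List.len_eq, hlen]
  rw [PySem.List.foldl_congr_mem _ _
      (fun t x => if PySem.List.pyGetD (s.take w) x ' ' = 'O' then t + row else t) total ?_]
  · rw [hcast, PySem.List.foldl_pyRange_zero_pyGetD (s.take w) ' '
        (fun t c => if c = 'O' then t + row else t) total]
    rw [PySem.List.foldl_congr_mem _ _
        (fun t c => t + (if (c == 'O') then row else 0)) total ?_]
    · rw [PySem.List.foldl_add]
      have : (List.map (fun c => if (c == 'O') then row else 0) (s.take w))
           = (List.map (fun c => row * (if (c == 'O') then (1:Int) else 0)) (s.take w)) := by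
        apply List.map_congr_left; intro c _; by_cases h : c = 'O' <;> simp [h]
      rw [this, List.sum_map_mul_left, PySem.List.sum_map_ite_one_zero, List.count]
    · intro t c _; by_cases h : c = 'O' <;> simp [h]
  · intro t x hx
    rw [PySem.List.mem_pyRange_one] at hx
    have h1 : x.toNat < w := by omega
    have h2 : x.toNat < s.length := by omega
    have hg : PySem.List.pyGet? s x = some s[x.toNat] := by
      simp [pysem, hx.1]
    have hd : PySem.List.pyGetD (s.take w) x ' ' = s[x.toNat] := by
      rw [PySem.List.pyGetD_eq_getElem _ ' ' hx.1 (by rw [hlen]; exact_mod_cast hx.2)]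
      simp [List.getElem_take]
    simp [hg, hd]

-- inner generator of B: the 0/1 column scan of s counts the 'O's among the first w chars
lemma count_cols_eq (s : List Char) (w : Nat) (hw : w ≤ s.length) :
    ((PySem.List.pyRange 0 (w : Int) 1).map
      (fun x => if PySem.List.pyGet? s x = some 'O' then (1:Int) else 0)).sum
    = ((s.take w).count 'O' : Int) := by
  have hlen : (s.take w).length = w := by simp [hw]
  have hcast : (w : Int) = PySem.List.len (s.take w) := by simp [PySem.List.len_eq, hlen]
  have hcg : (PySem.List.pyRange 0 (w : Int) 1).map
      (fun x => if PySem.List.pyGet? s x = some 'O' then (1:Int) else 0)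
      = ((PySem.List.pyRange 0 (w : Int) 1).map
          (fun x => PySem.List.pyGetD (s.take w) x ' ')).map
        (fun c => if (c == 'O') then (1:Int) else 0) := by
    rw [List.map_map]
    apply List.map_congr_left
    intro x hx
    rw [PySem.List.mem_pyRange_one] at hx
    have h1 : x.toNat < w := by omega
    have h2 : x.toNat < s.length := by omega
    have hg : PySem.List.pyGet? s x = some s[x.toNat] := by simp [pysem, hx.1]
    have hd : PySem.List.pyGetD (s.take w) x ' ' = s[x.toNat] := by
      rw [PySem.List.pyGetD_eq_getElem _ ' ' hx.1 (by rw [hlen]; exact_mod_cast hx.2)]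
      simp [List.getElem_take]
    simp [hg, hd, Function.comp]
  rw [hcg, hcast, PySem.List.map_pyGetD_pyRange_zero,
      PySem.List.sum_map_ite_one_zero, List.count]

-- closed form of B's cumulative loop: total = t + |l|*r + Σ_k (|l|-k)·c(l[k]), running = r + Σ c
lemma foldl_cum (l : List String) (c : String → Int) (t r : Int) :
    (l.foldl (fun (acc : Int × Int) row =>
        (acc.1 + (acc.2 + c row), acc.2 + c row)) (t, r))
    = (t + (l.length : Int) * r
         + ((List.range l.length).map (fun (k : Nat) => ((l.length : Int) - (k : Int)) * c (l.getD k ""))).sum,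
       r + (l.map c).sum) := by
  induction l generalizing t r with
  | nil => simp
  | cons row rest ih =>
    simp only [List.foldl_cons, ih, List.length_cons, List.map_cons, List.sum_cons]
    have hsum : (List.range (rest.length + 1)).map
          (fun (k : Nat) => (((rest.length + 1 : Nat) : Int) - (k : Int)) * c ((row :: rest).getD k ""))
        = (((rest.length + 1 : Nat) : Int)) * c row ::
          (List.range rest.length).map
            (fun (k : Nat) => ((rest.length : Int) - (k : Int)) * c (rest.getD k "")) := by
      rw [List.range_succ_eq_map, List.map_cons, List.map_map]
      simp only [List.getD_cons_zero, Nat.cast_zero, sub_zero]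
      congr 1
      apply List.map_congr_left
      intro k hk
      simp only [Function.comp, List.getD_cons_succ, Nat.succ_eq_add_one]
      push_cast
      ring_nf
    rw [hsum]
    simp only [List.sum_cons, Prod.mk.injEq]
    constructor
    · push_cast
      ring
    · ring

lemma width_match_eq (l : List String) :
    (match l with | [] => 0 | h :: _ => h.toList.length) = (l.headD "").toList.length := by
  cases l <;> simp

-- A's whole computation as a sum over row indices
lemma calc_py_eq_sum (inp : List String) (hpre : Pre_calc_py inp) :
    calc_py inp
      = ((List.range inp.length).map
          (fun (k : Nat) => ((inp.length : Int) - (k : Int)) *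
            (((PySem.List.pyGetD inp (k : Int) "").toList.take ((inp.headD "").toList.length)).count 'O' : Int))).sum := by
  unfold calc_py
  set n : Int := (inp.length : Int) with hn
  set w : Nat := (inp.headD "").toList.length with hwdef
  rw [PySem.List.foldl_congr_mem _ _
      (fun total row => total + row * (((PySem.List.pyGetD inp (n - row) "").toList.take w).count 'O' : Int)) 0 ?_]
  · rw [PySem.List.foldl_add, PySem.List.pyRange_neg_one, List.map_map]
    have hto : (n - 0).toNat = inp.length := by omega
    rw [hto, zero_add]
    congr 1
    apply List.map_congr_left
    intro k hk
    simp only [Function.comp, sub_sub_cancel]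
  · intro total row hrow
    rw [PySem.List.mem_pyRange_neg_one] at hrow
    have hne : inp ≠ [] := by
      intro h; rw [h] at hn; simp at hn; omega
    have h0 : PySem.List.pyGetD inp 0 "" = inp.headD "" := by
      cases inp with
      | nil => exact absurd rfl hne
      | cons h t => simp [pysem]
    have hy0 : 0 ≤ n - row := by omega
    have hy1 : n - row < (inp.length : Int) := by omega
    have hmem : PySem.List.pyGetD inp (n - row) "" ∈ inp := by
      rw [PySem.List.pyGetD_eq_getElem _ "" hy0 hy1]
      exact List.getElem_mem _
    have hw : w ≤ (PySem.List.pyGetD inp (n - row) "").toList.length := hpre _ hmem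
    show (PySem.List.pyRange 0 ((PySem.List.pyGetD inp 0 "").toList.length : Int) 1).foldl
      (fun t x => if PySem.List.pyGet? (PySem.List.pyGetD inp (n - row) "").toList x = some 'O' then t + row else t)
      total = _
    rw [h0, ← hwdef, inner_loop_eq _ w row total hw]

-- B's computation as the same sum
lemma calc_py_alt_eq_sum (inp : List String) (hpre : Pre_calc_py inp) :
    calc_py_alt inp
      = ((List.range inp.length).map
          (fun (k : Nat) => ((inp.length : Int) - (k : Int)) *
            (((PySem.List.pyGetD inp (k : Int) "").toList.take ((inp.headD "").toList.length)).count 'O' : Int))).sum := by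
  unfold calc_py_alt
  dsimp only
  rw [width_match_eq inp]
  set w : Nat := (inp.headD "").toList.length with hwdef
  set c : String → Int := fun row => ((PySem.List.pyRange 0 (w : Int) 1).map
      (fun x => if PySem.List.pyGet? row.toList x = some 'O' then (1:Int) else 0)).sum with hc
  rw [foldl_cum inp c 0 0]
  simp only [mul_zero, add_zero, zero_add]
  congr 1
  apply List.map_congr_left
  intro k hk
  rw [List.mem_range] at hk
  have hgd : PySem.List.pyGetD inp (k : Int) "" = inp.getD k "" := PySem.List.pyGetD_natCast inp k ""
  have hmem : inp.getD k "" ∈ inp := by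
    rw [List.getD_eq_getElem inp "" hk]
    exact List.getElem_mem _
  have hwle : w ≤ (inp.getD k "").toList.length := hpre _ hmem
  simp only [hc]
  rw [count_cols_eq _ w hwle, hgd]

-- ===== VERDICT (by name: the statement is the Claim_ definition above) =====
theorem calc_py_spec : Claim_equal_calc_py := by
  intro inp _ hpre
  unfold Spec_calc_py
  rw [calc_py_eq_sum inp hpre, calc_py_alt_eq_sum inp hpre]
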